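-- pv_equiv track=rewrite | github.com/abhisheksingh75/DataStructure_Algorithm | Desktop/Acadmey/git_repos/DataStructures/Dynamic_Programming/Number_of_Subsequences_with_Even_and_Odd_Sum.py | countOddSumSubSeq
-- ===== SOURCE A (Python) =====
-- def countOddSumSubSeq(A, N, curr_sum, DP):
--
--     if str(N)+":"+str(curr_sum) in  DP:
--         return DP[str(N)+":"+str(curr_sum)]
--     if N == -1:
--         if abs(curr_sum)%2 !=0:
--             return 1
--         else:
--             return 0
--     else:
--         DP[str(N)+":"+str(curr_sum)] = countOddSumSubSeq(A, N-1, curr_sum+A[N], DP)+countOddSumSubSeq(A, N-1, curr_sum, DP)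
--         return DP[str(N)+":"+str(curr_sum)]
-- ===== SOURCE B (Python) =====
-- def countOddSumSubSeq(A, N, curr_sum, DP):
--     prefix = A[:N + 1]
--     if any(x % 2 for x in prefix):
--         return 2 ** (len(prefix) - 1)
--     return 2 ** len(prefix) if curr_sum % 2 else 0
-- ===== Notes on version B (the rewrite author's own statement) =====
-- stated objective: faster
-- what changed: Replaced the memoized exponential-tree recursion over all subsequences by a closed form: scan the prefix A[:N+1] once — if it contains an odd element exactly half of the 2^(N+1) subsequences have odd total, i.e. 2^N; otherwise every subsequence keeps curr_sum's parity, giving 2^(N+1) if curr_sum is odd and 0 if even. Pre_ excludes N outside [-1, len(A)) (IndexError/unbounded recursion in A) and DP entries whose key has the memo-key shape int:int, on which A's return value is an artefact of the cache contents passed in.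
-- outside the precondition, e.g. on countOddSumSubSeq([2], 0, 0, {'0:0': 99}): A returns 99, B returns 0
import Mathlib
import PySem

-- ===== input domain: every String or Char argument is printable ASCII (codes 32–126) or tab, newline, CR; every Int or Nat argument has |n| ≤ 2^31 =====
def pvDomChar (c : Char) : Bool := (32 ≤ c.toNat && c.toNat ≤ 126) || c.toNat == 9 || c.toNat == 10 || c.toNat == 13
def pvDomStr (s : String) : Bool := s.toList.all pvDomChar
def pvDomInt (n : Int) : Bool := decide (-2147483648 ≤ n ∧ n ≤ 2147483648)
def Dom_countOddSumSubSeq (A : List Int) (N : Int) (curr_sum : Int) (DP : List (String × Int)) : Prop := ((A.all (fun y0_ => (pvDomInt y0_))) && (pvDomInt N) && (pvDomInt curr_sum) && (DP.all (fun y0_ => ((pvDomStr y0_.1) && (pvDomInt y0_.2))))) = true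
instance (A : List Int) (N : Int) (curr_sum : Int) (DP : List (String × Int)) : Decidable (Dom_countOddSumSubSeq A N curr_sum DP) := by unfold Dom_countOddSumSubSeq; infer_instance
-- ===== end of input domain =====

-- B replaces A's memoized exponential subsequence recursion by a one-pass parity closed form (measurably
-- asymptotically faster); the equivalence is about the RETURN value only: Python A also mutates the DP
-- memo dict in place, B leaves it untouched.

-- ===== PORT A =====
-- the memo key str(N) + ":" + str(curr_sum)
def pvKey (N curr_sum : Int) : String :=
  PySem.Int.toStr N ++ ":" ++ PySem.Int.toStr curr_sum

-- A's recursion, fuel = number of remaining levels (N+1); DP threaded through like Python's mutable dict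
def goA (A : List Int) : Nat → Int → Int → PySem.Dict String Int → Int × PySem.Dict String Int
  | fuel, N, c, DP =>
    match DP.get? (pvKey N c) with
    | some v => (v, DP)
    | none =>
      if N = -1 then
        (if c.natAbs % 2 ≠ 0 then (1 : Int) else 0, DP)
      else
        match fuel with
        | 0 => (0, DP)  -- fuel guard only; never reached when -1 ≤ N and fuel = (N+1).toNat
        | fuel' + 1 =>
          let a := PySem.List.pyGetD A N 0  -- A[N]; Pre_ keeps N in range, where the default is unreachable
          let r1 := goA A fuel' (N - 1) (c + a) DP
          let r2 := goA A fuel' (N - 1) c r1.2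
          (r1.1 + r2.1, r2.2.insert (pvKey N c) (r1.1 + r2.1))

def countOddSumSubSeq (A : List Int) (N : Int) (curr_sum : Int) (DP : List (String × Int)) : Int :=
  (goA A (N + 1).toNat N curr_sum (PySem.Dict.mk DP)).1

-- ===== PORT B =====
def countOddSumSubSeq_alt (A : List Int) (N : Int) (curr_sum : Int) (DP : List (String × Int)) : Int :=
  let pfx := PySem.List.slice A none (some (N + 1))
  if pfx.any (fun x => PySem.Int.mod x 2 != 0) then
    (2 : Int) ^ (pfx.length - 1)
  else if PySem.Int.mod curr_sum 2 ≠ 0 then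
    (2 : Int) ^ pfx.length
  else
    0

-- ===== PRECONDITION & SPEC =====
-- "-?digits:-?digits", the only shape A's internal memo keys str(N)+":"+str(curr_sum) can take
def pvIntLike : List Char → Bool
  | [] => false
  | c :: rest => if c = '-' then !rest.isEmpty && rest.all Char.isDigit else (c :: rest).all Char.isDigit

def pvSplitColon : List Char → Option (List Char × List Char)
  | [] => none
  | c :: rest =>
    if c = ':' then some ([], rest)
    else (pvSplitColon rest).map (fun p => (c :: p.1, p.2))

def pvMemoLike (s : String) : Bool :=
  match pvSplitColon s.toList with
  | some (l, r) => pvIntLike l && pvIntLike r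
  | none => false

-- Pre_ excludes: N outside [-1, len(A)), where Python A raises IndexError (or recurses forever);
-- and DP entries whose key looks like a memo key "int:int", which could collide with A's internal
-- "N:curr_sum" memo keys — there A's return value is an artefact of the cache contents passed in.
def Pre_countOddSumSubSeq (A : List Int) (N : Int) (curr_sum : Int) (DP : List (String × Int)) : Prop :=
  (-1 ≤ N) ∧ (N < A.length) ∧ (∀ p ∈ DP, pvMemoLike p.1 = false)
instance (A : List Int) (N : Int) (curr_sum : Int) (DP : List (String × Int)) : Decidable (Pre_countOddSumSubSeq A N curr_sum DP) := by unfold Pre_countOddSumSubSeq; infer_instance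

def pvWitness_countOddSumSubSeq : List Int × Int × Int × (List (String × Int)) := ([1, 2], 1, 0, [("x", 5)])

def Spec_countOddSumSubSeq (A : List Int) (N : Int) (curr_sum : Int) (DP : List (String × Int)) (out : Int) : Prop := out = countOddSumSubSeq_alt A N curr_sum DP
instance (A : List Int) (N : Int) (curr_sum : Int) (DP : List (String × Int)) (out : Int) : Decidable (Spec_countOddSumSubSeq A N curr_sum DP out) := by unfold Spec_countOddSumSubSeq; infer_instance

-- ===== CLAIM (what is proved, stated in full; the proofs are below) =====
def Claim_equal_countOddSumSubSeq : Prop := ∀ (A : List Int) (N : Int) (curr_sum : Int) (DP : List (String × Int)), Dom_countOddSumSubSeq A N curr_sum DP → Pre_countOddSumSubSeq A N curr_sum DP → Spec_countOddSumSubSeq A N curr_sum DP (countOddSumSubSeq A N curr_sum DP)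

-- ===== LEMMAS AND PROOFS =====

-- the pure (memo-free) recursion A implements, counted over n = N+1 remaining elements
def fpure (A : List Int) : Nat → Int → Int
  | 0, c => if c.natAbs % 2 ≠ 0 then 1 else 0
  | n + 1, c => fpure A n (c + A.getD n 0) + fpure A n c

-- ---- decimal-digit facts about Nat.toDigits (needed for injectivity of A's memo keys) ----

theorem pv_digitChar_toNat : ∀ m : Nat, m < 10 → (Nat.digitChar m).toNat = 48 + m := by decide

theorem pv_digitChar_isDigit : ∀ m : Nat, m < 10 → (Nat.digitChar m).isDigit = true := by decide

theorem pv_toDigitsCore_acc (f : Nat) : ∀ (n : Nat) (acc : List Char),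
    Nat.toDigitsCore 10 f n acc = Nat.toDigitsCore 10 f n [] ++ acc := by
  induction f with
  | zero => intro n acc; simp [Nat.toDigitsCore]
  | succ f ih =>
    intro n acc
    simp only [Nat.toDigitsCore]
    by_cases h : n / 10 = 0
    · simp [h]
    · simp only [h, if_false]
      rw [ih (n / 10) (Nat.digitChar (n % 10) :: acc), ih (n / 10) [Nat.digitChar (n % 10)]]
      simp

def pvVal (cs : List Char) : Nat := cs.foldl (fun a c => 10 * a + (c.toNat - 48)) 0

theorem pv_val_append_singleton (cs : List Char) (d : Char) :
    pvVal (cs ++ [d]) = 10 * pvVal cs + (d.toNat - 48) := by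
  simp [pvVal, List.foldl_append]

theorem pv_toDigitsCore_val (f : Nat) : ∀ n : Nat, n < f →
    pvVal (Nat.toDigitsCore 10 f n []) = n := by
  induction f with
  | zero => intro n h; omega
  | succ f ih =>
    intro n h
    simp only [Nat.toDigitsCore]
    by_cases h0 : n / 10 = 0
    · have hn : n < 10 := by omega
      simp [h0, pvVal, pv_digitChar_toNat (n % 10) (by omega)]
      omega
    · simp only [h0, if_false]
      rw [pv_toDigitsCore_acc f (n / 10) [Nat.digitChar (n % 10)],
        pv_val_append_singleton, ih (n / 10) (by omega),
        pv_digitChar_toNat (n % 10) (by omega)]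
      omega

theorem pv_toDigits_val (n : Nat) : pvVal (Nat.toDigits 10 n) = n :=
  pv_toDigitsCore_val (n + 1) n (by omega)

theorem pv_toDigits_inj {m n : Nat} (h : Nat.toDigits 10 m = Nat.toDigits 10 n) : m = n := by
  have := pv_toDigits_val m
  rw [h, pv_toDigits_val] at this
  omega

theorem pv_toDigitsCore_digits (f : Nat) : ∀ n : Nat, ∀ c ∈ Nat.toDigitsCore 10 f n [], c.isDigit = true := by
  induction f with
  | zero => intro n c hc; simp [Nat.toDigitsCore] at hc
  | succ f ih =>
    intro n c hc
    simp only [Nat.toDigitsCore] at hc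
    by_cases h0 : n / 10 = 0
    · simp [h0] at hc
      rw [hc]; exact pv_digitChar_isDigit (n % 10) (by omega)
    · simp only [h0, if_false] at hc
      rw [pv_toDigitsCore_acc f (n / 10) [Nat.digitChar (n % 10)]] at hc
      rcases List.mem_append.mp hc with h | h
      · exact ih (n / 10) c h
      · simp at h; rw [h]; exact pv_digitChar_isDigit (n % 10) (by omega)

theorem pv_toDigits_digits (n : Nat) : ∀ c ∈ Nat.toDigits 10 n, c.isDigit = true :=
  pv_toDigitsCore_digits (n + 1) n

theorem pv_colon_notin_toChars (n : Int) : ':' ∉ PySem.Int.toChars n := by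
  intro h
  simp only [PySem.Int.toChars] at h
  split at h
  · rcases List.mem_cons.mp h with h | h
    · exact absurd h (by decide)
    · have := pv_toDigits_digits n.natAbs ':' h; exact absurd this (by decide)
  · have := pv_toDigits_digits n.toNat ':' h; exact absurd this (by decide)

theorem pv_dash_not_mem_toDigits (n : Nat) : '-' ∉ Nat.toDigits 10 n := by
  intro h
  exact absurd (pv_toDigits_digits n '-' h) (by decide)

theorem pv_toDigits_ne_nil (n : Nat) : Nat.toDigits 10 n ≠ [] := by
  show Nat.toDigitsCore 10 (n + 1) n [] ≠ []
  simp only [Nat.toDigitsCore]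
  by_cases h0 : n / 10 = 0
  · simp [h0]
  · simp only [h0, if_false]
    rw [pv_toDigitsCore_acc n (n / 10) [Nat.digitChar (n % 10)]]
    simp

theorem pv_digit_ne_dash {c : Char} (h : c.isDigit = true) : c ≠ '-' := by
  intro he
  subst he
  exact absurd h (by decide)

theorem pv_intLike_toChars (n : Int) : pvIntLike (PySem.Int.toChars n) = true := by
  simp only [PySem.Int.toChars]
  split
  · simp only [pvIntLike]
    simp [pv_toDigits_ne_nil n.natAbs]
    exact pv_toDigits_digits n.natAbs
  · cases hD : Nat.toDigits 10 n.toNat with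
    | nil => exact absurd hD (pv_toDigits_ne_nil n.toNat)
    | cons a t =>
      have ha : a.isDigit = true := pv_toDigits_digits n.toNat a (hD ▸ List.mem_cons_self)
      simp only [pvIntLike, if_neg (pv_digit_ne_dash ha), List.all_eq_true]
      intro c hc
      exact pv_toDigits_digits n.toNat c (hD ▸ hc)

theorem pv_splitColon_append (xs ys : List Char) (h : ':' ∉ xs) :
    pvSplitColon (xs ++ ':' :: ys) = some (xs, ys) := by
  induction xs with
  | nil => simp [pvSplitColon]
  | cons a t ih =>
    have ha : a ≠ ':' := fun he => h (he ▸ List.mem_cons_self)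
    simp only [List.cons_append, pvSplitColon, if_neg ha,
      ih (fun hm => h (List.mem_cons_of_mem _ hm)), Option.map_some]

theorem pv_key_toList (k s : Int) :
    (pvKey k s).toList = PySem.Int.toChars k ++ ':' :: PySem.Int.toChars s := by
  simp [pvKey, String.toList_append, PySem.Int.toList_toStr]

theorem pv_memoLike_key (k s : Int) : pvMemoLike (pvKey k s) = true := by
  unfold pvMemoLike
  rw [pv_key_toList, pv_splitColon_append _ _ (pv_colon_notin_toChars k)]
  simp [pv_intLike_toChars]

theorem pv_toChars_inj {a b : Int} (h : PySem.Int.toChars a = PySem.Int.toChars b) : a = b := by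
  simp only [PySem.Int.toChars] at h
  split at h <;> split at h
  · rename_i ha hb
    have : a.natAbs = b.natAbs := pv_toDigits_inj (List.cons_injective h)
    omega
  · rename_i ha hb
    exact absurd (h ▸ List.mem_cons_self) (pv_dash_not_mem_toDigits b.toNat)
  · rename_i ha hb
    exact absurd (h ▸ List.mem_cons_self) (pv_dash_not_mem_toDigits a.toNat)
  · rename_i ha hb
    have : a.toNat = b.toNat := pv_toDigits_inj h
    omega

-- xs ++ c :: ys = xs' ++ c :: ys' with c ∉ xs, c ∉ xs' forces xs = xs', ys = ys'
theorem pv_split_at_sep {c : Char} : ∀ (xs xs' ys ys' : List Char), c ∉ xs → c ∉ xs' →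
    xs ++ c :: ys = xs' ++ c :: ys' → xs = xs' ∧ ys = ys' := by
  intro xs
  induction xs with
  | nil =>
    intro xs' ys ys' _ hx' h
    cases xs' with
    | nil => simpa using h
    | cons a t =>
      simp at h
      exact absurd (h.1 ▸ List.mem_cons_self) hx'
  | cons a t ih =>
    intro xs' ys ys' hx hx' h
    cases xs' with
    | nil =>
      simp at h
      exact absurd (h.1 ▸ List.mem_cons_self) hx
    | cons a' t' =>
      simp at h
      obtain ⟨rfl, h2⟩ := h
      have := ih t' ys ys' (fun hm => hx (List.mem_cons_of_mem _ hm))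
        (fun hm => hx' (List.mem_cons_of_mem _ hm)) h2
      exact ⟨by rw [this.1], this.2⟩

theorem pv_key_inj {k s N c : Int} (h : pvKey k s = pvKey N c) : k = N ∧ s = c := by
  have hl : (pvKey k s).toList = (pvKey N c).toList := by rw [h]
  simp only [pvKey, String.toList_append, PySem.Int.toList_toStr] at hl
  have hcol : (":" : String).toList = [':'] := rfl
  rw [hcol] at hl
  have := pv_split_at_sep (PySem.Int.toChars k) (PySem.Int.toChars N)
    (PySem.Int.toChars s) (PySem.Int.toChars c)
    (pv_colon_notin_toChars k) (pv_colon_notin_toChars N) (by simpa using hl)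
  exact ⟨pv_toChars_inj this.1, pv_toChars_inj this.2⟩

-- ---- memoization invariant ----

def pvInv (A : List Int) (d : PySem.Dict String Int) : Prop :=
  ∀ k s v, d.get? (pvKey k s) = some v → v = fpure A (k + 1).toNat s

theorem pv_goA_correct (A : List Int) : ∀ (fuel : Nat) (N c : Int) (d : PySem.Dict String Int),
    -1 ≤ N → N < A.length → (N + 1).toNat ≤ fuel → pvInv A d →
    (goA A fuel N c d).1 = fpure A (N + 1).toNat c ∧ pvInv A (goA A fuel N c d).2 := by
  intro fuel
  induction fuel with
  | zero =>
    intro N c d h1 h2 h3 hinv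
    have hN : N = -1 := by omega
    subst hN
    simp only [goA]
    cases hdg : d.get? (pvKey (-1) c) with
    | some v => exact ⟨hinv (-1) c v hdg, hinv⟩
    | none => exact ⟨rfl, hinv⟩
  | succ fuel ih =>
    intro N c d h1 h2 h3 hinv
    simp only [goA]
    cases hdg : d.get? (pvKey N c) with
    | some v => exact ⟨hinv N c v hdg, hinv⟩
    | none =>
      by_cases hN : N = -1
      · subst hN; exact ⟨rfl, hinv⟩
      · have hN0 : 0 ≤ N := by omega
        simp only [if_neg hN]
        obtain ⟨ih1, hinv1⟩ := ih (N - 1) (c + PySem.List.pyGetD A N 0) d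
          (by omega) (by omega) (by omega) hinv
        obtain ⟨ih2, hinv2⟩ := ih (N - 1) c _ (by omega) (by omega) (by omega) hinv1
        have hN1 : (N + 1).toNat = (N - 1 + 1).toNat + 1 := by omega
        have hstep : fpure A (N + 1).toNat c
            = fpure A (N - 1 + 1).toNat (c + PySem.List.pyGetD A N 0)
              + fpure A (N - 1 + 1).toNat c := by
          rw [hN1, fpure]
          have hga : A.getD (N - 1 + 1).toNat 0 = PySem.List.pyGetD A N 0 := by
            rw [PySem.List.pyGetD_of_nonneg A 0 hN0]
            congr 1
            omega
          rw [hga]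
        have hfst : (goA A fuel (N - 1) (c + PySem.List.pyGetD A N 0) d).1
            + (goA A fuel (N - 1) c (goA A fuel (N - 1) (c + PySem.List.pyGetD A N 0) d).2).1
            = fpure A (N + 1).toNat c := by
          rw [ih1, ih2, hstep]
        refine ⟨hfst, ?_⟩
        intro k s v hget
        rw [PySem.Dict.get?_insert] at hget
        split at hget
        · rename_i heq
          obtain ⟨hk, hs⟩ := pv_key_inj heq
          rw [hk, hs, ← hfst]
          exact (Option.some_injective _ hget).symm
        · exact hinv2 k s v hget

-- ---- closed form ----

theorem pv_fpure_closed (A : List Int) : ∀ (n : Nat) (c : Int), n ≤ A.length →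
    fpure A n c = if (A.take n).any (fun x => x % 2 != 0) then (2 : Int) ^ (n - 1)
      else if c % 2 ≠ 0 then (2 : Int) ^ n else 0 := by
  intro n
  induction n with
  | zero =>
    intro c _
    simp only [fpure, List.take_zero, List.any_nil, if_false, Bool.false_eq_true, pow_zero]
    split_ifs with h1 h2 h2 <;> first | rfl | omega
  | succ n ih =>
    intro c h
    have hn : n < A.length := by omega
    have hgd : A.getD n 0 = A[n] := by
      rw [List.getD_eq_getElem?_getD, List.getElem?_eq_getElem hn, Option.getD_some]
    have htake : A.take (n + 1) = A.take n ++ [A[n]] := by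
      rw [List.take_succ, List.getElem?_eq_getElem hn, Option.toList_some]
    rw [fpure, ih _ (by omega), ih _ (by omega), htake, hgd]
    simp only [List.any_append, List.any_cons, List.any_nil, Bool.or_false]
    by_cases h1 : (A.take n).any (fun x => x % 2 != 0) = true
    · have hn1 : 1 ≤ n := by
        rcases Nat.eq_zero_or_pos n with rfl | h'
        · simp at h1
        · exact h'
      have hp : (2 : Int) ^ (n - 1) + 2 ^ (n - 1) = 2 ^ n := by
        have h2 : n - 1 + 1 = n := by omega
        calc (2 : Int) ^ (n - 1) + 2 ^ (n - 1) = 2 ^ (n - 1) * 2 := by ring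
          _ = 2 ^ (n - 1 + 1) := (pow_succ 2 (n - 1)).symm
          _ = 2 ^ n := by rw [h2]
      simp [h1, hp]
    · simp only [h1, if_false, Bool.false_or, Bool.false_eq_true]
      by_cases h2 : A[n] % 2 = 0
      · have hpar : (c + A[n]) % 2 = c % 2 := by omega
        have h2' : (A[n] % 2 != 0) = false := by simp [h2]
        rw [hpar, h2']
        by_cases hc : c % 2 ≠ 0
        · simp only [Bool.false_eq_true, if_false]
          rw [if_pos hc, if_pos hc]
          calc (2 : Int) ^ n + 2 ^ n = 2 ^ n * 2 := by ring
            _ = 2 ^ (n + 1) := (pow_succ 2 n).symm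
        · simp [hc]
      · have h2' : (A[n] % 2 != 0) = true := by simp [h2]
        have hpar : ((c + A[n]) % 2 ≠ 0) ↔ ¬(c % 2 ≠ 0) := by omega
        rw [h2']
        simp only [if_true, Nat.add_sub_cancel]
        by_cases hc : c % 2 ≠ 0
        · simp [hc, hpar.not.mpr (by simpa using hc)]
        · have : (c + A[n]) % 2 ≠ 0 := hpar.mpr hc
          simp [hc, this]

-- ===== VERDICT (by name: the statement is the Claim_ definition above) =====
theorem countOddSumSubSeq_spec : Claim_equal_countOddSumSubSeq := by
  intro A N c DP _ hpre
  obtain ⟨h1, h2, h3⟩ := hpre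
  unfold Spec_countOddSumSubSeq countOddSumSubSeq countOddSumSubSeq_alt
  have hinv : pvInv A (PySem.Dict.mk DP) := by
    intro k s v hget
    have hmem : (pvKey k s, v) ∈ DP := PySem.Dict.mem_items_of_get?_eq_some _ hget
    have hbad := h3 _ hmem
    rw [pv_memoLike_key] at hbad
    exact absurd hbad (by decide)
  have hmain := pv_goA_correct A (N + 1).toNat N c (PySem.Dict.mk DP) h1 h2 le_rfl hinv
  rw [hmain.1, pv_fpure_closed A (N + 1).toNat c (by omega)]
  have hsl : PySem.List.slice A none (some (N + 1)) = A.take (N + 1).toNat := by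
    rw [show (some (N + 1) : Option Int) = some (((N + 1).toNat : Nat) : Int) by
      congr 1; omega]
    exact PySem.List.slice_to_natCast A (N + 1).toNat
  have hlen : (A.take (N + 1).toNat).length = (N + 1).toNat := by
    rw [List.length_take]
    omega
  simp only [hsl, hlen, PySem.Int.mod_eq_emod_of_pos (by norm_num : (0 : Int) < 2)]
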